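-- pv_equiv track=rewrite | github.com/Dmartinez-96/LeetCode_Practice_Sols | LeetCode75-sols/Sliding_Window/Python/Longest_Subarray_of_1s_After_Deleting_One_Element.py | find
-- ===== SOURCE A (Python) =====
-- from typing import List
--
-- def find(nums: List[int], guess: int) -> int:
--     start = 0
--     end = start + guess
--     s = sum(nums[start:end])
--
--     while (end < len(nums)):
--         l = end - start
--         if (l - s) <= 1:
--             return s
--         s -= nums[start]
--         start += 1
--
--         s += nums[end]
--         end += 1
--
--     l = end - start
--     if ((l - s) <= 1):
--         return s
--
--     return -1
-- ===== SOURCE B (Python) =====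
-- def find(nums, guess):
--     n = len(nums)
--     prefix = [0]
--     total = 0
--     for v in nums:
--         total += v
--         prefix.append(total)
--     for start in range(max(0, n - guess) + 1):
--         s = prefix[min(start + guess, n)] - prefix[start]
--         if guess - s <= 1:
--             return s
--     return -1
-- ===== Notes on version B (the rewrite author's own statement) =====
-- stated objective: alternative
-- what changed: B precomputes a prefix-sum array and scans window start positions with O(1) window sums, instead of A's running sliding-window sum maintained by add/subtract; Pre_ excludes negative guess (not a window size; A hits negative-index wraparound and IndexError there).
-- outside the precondition, e.g. on find([1, 2, 3], -1): A returns 3, B returns 6; on find([-10, -10], -1): A raises IndexError, B returns 10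
import Mathlib
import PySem

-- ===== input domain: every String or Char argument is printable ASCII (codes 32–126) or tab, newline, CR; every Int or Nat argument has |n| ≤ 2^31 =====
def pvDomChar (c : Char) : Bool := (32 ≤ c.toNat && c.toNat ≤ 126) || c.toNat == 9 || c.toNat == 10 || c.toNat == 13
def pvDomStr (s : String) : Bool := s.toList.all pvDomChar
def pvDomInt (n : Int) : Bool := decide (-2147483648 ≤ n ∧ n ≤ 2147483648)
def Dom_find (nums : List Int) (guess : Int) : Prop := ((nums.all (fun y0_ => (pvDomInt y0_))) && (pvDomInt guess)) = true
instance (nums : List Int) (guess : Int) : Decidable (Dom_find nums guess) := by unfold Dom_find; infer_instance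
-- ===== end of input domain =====

-- B replaces A's running sliding-window sum with a prefix-sum array and a scan of start
-- positions (alternative structure, same cost); proved equal for guess ≥ 0 (Pre_find).

-- ===== PORT A =====
-- A's while loop; fuel counts the remaining iterations (exact under Pre_find: the loop body
-- runs exactly (len - guess)⁺ times). pyGetD nums i 0 = nums[i]; under Pre_find the index is
-- always in range, so the default is never read.
def findLoop (nums : List Int) (fuel : Nat) (start e s : Int) : Int :=
  match fuel with
  | 0 =>
      -- end ≥ len(nums): the final check after the loop
      if e - start - s ≤ 1 then s else -1
  | f + 1 =>
      if e < (nums.length : Int) then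
        if e - start - s ≤ 1 then s
        else
          findLoop nums f (start + 1) (e + 1)
            (s - PySem.List.pyGetD nums start 0 + PySem.List.pyGetD nums e 0)
      else
        if e - start - s ≤ 1 then s else -1

def find (nums : List Int) (guess : Int) : Int :=
  let s := (PySem.List.slice nums (some 0) (some guess)).sum   -- sum(nums[0:guess])
  findLoop nums ((nums.length : Int) - guess).toNat 0 (0 + guess) s

-- ===== PORT B =====
-- prefix = [0]; total = 0; for v in nums: total += v; prefix.append(total)
def prefixStep (acc : List Int × Int) (v : Int) : List Int × Int :=
  (acc.1 ++ [acc.2 + v], acc.2 + v)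

-- for start in range(...): s = prefix[min(start+guess, n)] - prefix[start]; ...
-- prefix indices are in range under Pre_find, so pyGetD's default is never read.
def altLoop (pref : List Int) (n guess : Int) : List Int → Int
  | [] => -1
  | start :: rest =>
      let s := PySem.List.pyGetD pref (min (start + guess) n) 0
               - PySem.List.pyGetD pref start 0
      if guess - s ≤ 1 then s else altLoop pref n guess rest

def find_alt (nums : List Int) (guess : Int) : Int :=
  let n : Int := nums.length
  let pref := (nums.foldl prefixStep ([0], 0)).1
  altLoop pref n guess (PySem.List.pyRange 0 (max 0 (n - guess) + 1) 1)

-- ===== PRECONDITION & SPEC =====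
-- Pre_find restricts guess (a window length) to its natural domain: on negative guess A
-- relies on Python's negative-index wraparound and raises IndexError on many inputs.
def Pre_find (_nums : List Int) (guess : Int) : Prop := 0 ≤ guess
instance (nums : List Int) (guess : Int) : Decidable (Pre_find nums guess) := by unfold Pre_find; infer_instance
def pvWitness_find : List Int × Int := ([1, 0, 1, 1, 0, 1], 4)

def Spec_find (nums : List Int) (guess : Int) (out : Int) : Prop := out = find_alt nums guess
instance (nums : List Int) (guess : Int) (out : Int) : Decidable (Spec_find nums guess out) := by unfold Spec_find; infer_instance

-- ===== CLAIM (what is proved, stated in full; the proofs are below) =====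
def Claim_equal_find : Prop := ∀ (nums : List Int) (guess : Int), Dom_find nums guess → Pre_find nums guess → Spec_find nums guess (find nums guess)

-- ===== LEMMAS AND PROOFS =====

-- Reference: first start k (among m candidates) whose window sum s satisfies g - s ≤ 1.
def refLoop (nums : List Int) (g : Nat) : Nat → Nat → Int
  | 0, _ => -1
  | m + 1, k =>
      let s := ((nums.drop k).take g).sum
      if (g : Int) - s ≤ 1 then s else refLoop nums g m (k + 1)

theorem window_slide (nums : List Int) (k g : Nat) (h : k + g < nums.length) :
    ((nums.drop (k + 1)).take g).sum
      = ((nums.drop k).take g).sum - nums.getD k 0 + nums.getD (k + g) 0 := by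
  cases g with
  | zero =>
      simp
  | succ g' =>
      have hk : k < nums.length := by omega
      have hd : nums.drop k = nums[k] :: nums.drop (k+1) := List.drop_eq_getElem_cons hk
      have h1 : ((nums.drop k).take (g'+1)).sum
          = nums[k] + ((nums.drop (k+1)).take g').sum := by
        rw [hd, List.take_succ_cons, List.sum_cons]
      have hlen : g' < (nums.drop (k+1)).length := by simp; omega
      have h2 : (nums.drop (k+1)).take (g'+1)
          = (nums.drop (k+1)).take g' ++ [(nums.drop (k+1))[g']] := by
        rw [List.take_add_one]; simp [List.getElem?_eq_getElem hlen]
      have h3 : (nums.drop (k+1))[g'] = nums[k+1+g'] := by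
        simp [List.getElem_drop]
      rw [h2]
      simp only [List.sum_append, List.sum_cons, List.sum_nil]
      rw [h3, h1]
      have : nums.getD k 0 = nums[k] := by rw [List.getD_eq_getElem _ _ hk]
      have h5 : nums.getD (k + (g'+1)) 0 = nums[k+1+g'] := by
        rw [List.getD_eq_getElem]; congr 1; omega; omega
      rw [this, h5]; ring

theorem a_loop_eq (nums : List Int) (g : Nat) :
    ∀ (m k : Nat), (k + g + m = nums.length ∨ (m = 0 ∧ nums.length ≤ k + g)) →
      findLoop nums m (k : Int) ((k : Int) + (g : Int)) ((nums.drop k).take g).sum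
        = refLoop nums g (m + 1) k := by
  intro m
  induction m with
  | zero =>
      intro k hk
      simp only [findLoop, refLoop]
      split_ifs with h1 h2 h2 <;> first | rfl | omega
  | succ f ih =>
      intro k hk
      have hn : k + g + (f + 1) = nums.length := by omega
      have hlt : (k : Int) + (g : Int) < (nums.length : Int) := by omega
      simp only [findLoop, if_pos hlt, add_sub_cancel_left]
      conv_rhs => rw [refLoop]
      split_ifs with h1
      · rfl
      · have hg1 : PySem.List.pyGetD nums ((k : Nat) : Int) 0 = nums.getD k 0 :=
          PySem.List.pyGetD_natCast nums k 0
        have hcast : (k : Int) + (g : Int) = ((k + g : Nat) : Int) := by push_cast; ring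
        have hg2 : PySem.List.pyGetD nums ((k : Int) + (g : Int)) 0 = nums.getD (k + g) 0 := by
          rw [hcast]; exact PySem.List.pyGetD_natCast nums (k + g) 0
        rw [hg1, hg2]
        have hs : ((nums.drop k).take g).sum - nums.getD k 0 + nums.getD (k + g) 0
            = ((nums.drop (k + 1)).take g).sum := (window_slide nums k g (by omega)).symm
        rw [hs]
        have hcast2 : ((k : Nat) : Int) + 1 = ((k + 1 : Nat) : Int) := by push_cast; ring
        have hcast3 : (k : Int) + (g : Int) + 1 = ((k + 1 : Nat) : Int) + (g : Int) := by
          push_cast; ring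
        rw [hcast2, hcast3]
        exact ih (k + 1) (by omega)

theorem prefix_eq (nums : List Int) :
    ∀ (p0 : List Int) (t0 : Int),
      List.foldl prefixStep (p0, t0) nums
        = (p0 ++ (List.range nums.length).map (fun i => t0 + (nums.take (i + 1)).sum),
           t0 + nums.sum) := by
  induction nums with
  | nil => intro p0 t0; simp
  | cons v tl ih =>
      intro p0 t0
      simp only [List.foldl_cons, prefixStep, ih, List.length_cons, List.sum_cons,
        Prod.mk.injEq]
      refine ⟨?_, by ring⟩
      rw [List.range_succ_eq_map]
      simp [List.map_map, Function.comp_def, add_assoc]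

theorem prefix_get (nums : List Int) (j : Nat) (hj : j ≤ nums.length) :
    PySem.List.pyGetD (nums.foldl prefixStep ([0], 0)).1 (j : Int) 0
      = (nums.take j).sum := by
  rw [prefix_eq, PySem.List.pyGetD_natCast]
  cases j with
  | zero => simp
  | succ i =>
      have hi : i < nums.length := by omega
      rw [List.getD_eq_getElem]
      · simp [hi]
      · simp; omega

theorem b_loop_eq (nums : List Int) (g : Nat) :
    ∀ (m k : Nat), k + m = nums.length - g + 1 →
      altLoop (nums.foldl prefixStep ([0], 0)).1 (nums.length : Int) (g : Int)
          (PySem.List.pyRange (k : Int) (((nums.length - g : Nat) : Int) + 1) 1)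
        = refLoop nums g m k := by
  intro m
  induction m with
  | zero =>
      intro k hk
      rw [PySem.List.pyRange_one_eq_nil (by omega)]
      rfl
  | succ f ih =>
      intro k hk
      rw [PySem.List.pyRange_one_cons (by omega : (k : Int) < ((nums.length - g : Nat) : Int) + 1)]
      simp only [altLoop]
      have hmin : min ((k : Int) + (g : Int)) (nums.length : Int)
          = ((min (k + g) nums.length : Nat) : Int) := by omega
      rw [hmin, prefix_get nums (min (k + g) nums.length) (min_le_right _ _),
          prefix_get nums k (by omega)]
      have hW : (nums.take (min (k + g) nums.length)).sum - (nums.take k).sum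
          = ((nums.drop k).take g).sum := by
        have htk : nums.take (min (k + g) nums.length) = nums.take (k + g) := by
          rcases Nat.lt_or_ge nums.length (k + g) with h | h
          · rw [min_eq_right h.le, List.take_length, List.take_of_length_le h.le]
          · rw [min_eq_left h]
        rw [htk, List.take_add, List.sum_append]
        ring
      rw [hW]
      conv_rhs => rw [refLoop]
      split_ifs with h1
      · rfl
      · have : (k : Int) + 1 = ((k + 1 : Nat) : Int) := by push_cast; ring
        rw [this]
        exact ih (k + 1) (by omega)

-- ===== VERDICT (by name: the statement is the Claim_ definition above) =====
theorem find_spec : Claim_equal_find := by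
  intro nums guess _ hpre
  obtain ⟨g, rfl⟩ : ∃ g : Nat, guess = (g : Int) :=
    ⟨guess.toNat, (Int.toNat_of_nonneg hpre).symm⟩
  unfold Spec_find find find_alt
  have hslice : PySem.List.slice nums (some 0) (some (g : Int)) = nums.take g := by
    rw [PySem.List.slice_toNat nums (by omega) (by omega)]
    simp
  have hfuel : (((nums.length : Int) - (g : Int)).toNat) = nums.length - g := by omega
  have hmax : max 0 ((nums.length : Int) - (g : Int)) = ((nums.length - g : Nat) : Int) := by
    omega
  have hA := a_loop_eq nums g (nums.length - g) 0 (by omega)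
  norm_num at hA
  have hB := b_loop_eq nums g (nums.length - g + 1) 0 (by omega)
  norm_num at hB
  simp only [zero_add]
  rw [hslice, hfuel, hmax, hA, hB]
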